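-- pv_equiv track=rewrite | github.com/lkraider/debarkoder | format_2of5.py | deinterleave
-- ===== SOURCE A (Python) =====
-- head_data = '0000'
--
-- tail_data = '100'
--
-- def group(data, size):
--     """ Return a batch of requested size from the supplied data at each iteration. """
--     for i in range(0, len(data), size):
--         yield data[i:i+size]
--
-- def convert(encoded):
--     """ Convert data encoded in tuple format to string buffer format. """
--     return str.join('', (str(v) for v,c in encoded))
--
-- def deinterleave(encoded):
--     """
--     Return the encoded data in the correct order and format for decoding.
--
--     Parse the encoded data into 5 black bars, followed by 5 white bars and so on,
--     verifying first the header and tail and skipping them on conversion.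
--
--     >>> deinterleave([(0, 'b'), (0, 'w'), (0, 'b'), (0, 'w'), \
--                       (0, 'b'), (0, 'w'), (0, 'b'), (0, 'w'), (1, 'b'), \
--                       (0, 'w'), (1, 'b'), (0, 'w'), (0, 'b'), (1, 'w'), \
--                       (1, 'b'), (0, 'w'), (0, 'b')])
--     '0011000001'
--     """
--     head = convert(encoded[:4])
--     tail = convert(encoded[-3:])
--     if head != head_data or tail != tail_data:
--         return None
--     black = encoded[4:-3:2]
--     white = encoded[5:-3:2]
--     data = ''
--     for bline, wline in zip(group(black, 5), group(white, 5)):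
--         data += convert(bline) + convert(wline)
--     return data
-- ===== SOURCE B (Python) =====
-- head_data = '0000'
--
-- tail_data = '100'
--
-- def _split_alternating(chunk):
--     """Split a chunk into its even-position and odd-position elements."""
--     blacks, whites = [], []
--     for i, item in enumerate(chunk):
--         (blacks if i % 2 == 0 else whites).append(item)
--     return blacks, whites
--
-- def deinterleave(encoded):
--     if ''.join(str(v) for v, _ in encoded[:4]) != head_data:
--         return None
--     if ''.join(str(v) for v, _ in encoded[-3:]) != tail_data:
--         return None
--     middle = encoded[4:-3]
--     parts = []
--     while len(middle) >= 2:
--         chunk, middle = middle[:10], middle[10:]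
--         blacks, whites = _split_alternating(chunk)
--         parts.append(''.join(str(v) for v, _ in blacks))
--         parts.append(''.join(str(v) for v, _ in whites))
--     return ''.join(parts)
-- ===== Notes on version B (the rewrite author's own statement) =====
-- stated objective: alternative
-- what changed: Instead of building the black/white bar lists with step-2 slices and zipping their 5-groups, B walks the middle section once, consuming ten bars at a time and splitting each chunk into its alternating halves.
import Mathlib
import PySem

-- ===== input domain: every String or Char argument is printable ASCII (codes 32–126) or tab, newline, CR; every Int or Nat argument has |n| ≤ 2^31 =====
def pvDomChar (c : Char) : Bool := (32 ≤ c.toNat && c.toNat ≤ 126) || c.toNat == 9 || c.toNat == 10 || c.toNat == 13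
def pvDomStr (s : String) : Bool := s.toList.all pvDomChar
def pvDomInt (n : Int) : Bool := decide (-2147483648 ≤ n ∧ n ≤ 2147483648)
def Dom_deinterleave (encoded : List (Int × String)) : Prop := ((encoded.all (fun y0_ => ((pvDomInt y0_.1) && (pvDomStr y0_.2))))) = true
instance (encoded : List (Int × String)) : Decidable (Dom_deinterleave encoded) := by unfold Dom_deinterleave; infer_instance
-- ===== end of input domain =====

-- B replaces A's step-2 slices plus zip of 5-groups by one while-loop that consumes the
-- middle ten bars at a time, splitting each chunk into its alternating halves (objective: alternative decomposition).

-- ===== PORT A =====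
-- convert(encoded) = ''.join(str(v) for v, c in encoded)
def convertA (xs : List (Int × String)) : List Char :=
  xs.flatMap (fun p => PySem.Int.toChars p.1)

-- group(data, size): data[i:i+size] for i in range(0, len(data), size)
def groupA (data : List (Int × String)) (size : Int) : List (List (Int × String)) :=
  (PySem.List.pyRange 0 (data.length : Int) size).map
    (fun i => PySem.List.slice data (some i) (some (i + size)))

def deinterleave (encoded : List (Int × String)) : Option String :=
  let hd := convertA (PySem.List.slice encoded none (some 4))      -- convert(encoded[:4])
  let tl := convertA (PySem.List.slice encoded (some (-3)) none)   -- convert(encoded[-3:])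
  if hd ≠ ['0', '0', '0', '0'] ∨ tl ≠ ['1', '0', '0'] then none
  else
    -- step 2 ≠ 0, so slice? is always `some`; `.getD []` is exact here
    let black := (PySem.List.slice? encoded (some 4) (some (-3)) 2).getD []   -- encoded[4:-3:2]
    let white := (PySem.List.slice? encoded (some 5) (some (-3)) 2).getD []   -- encoded[5:-3:2]
    let data := ((groupA black 5).zip (groupA white 5)).foldl
      (fun acc bw => acc ++ convertA bw.1 ++ convertA bw.2) []
    some (String.ofList data)

-- ===== PORT B =====
def digitsB (xs : List (Int × String)) : List Char :=
  xs.flatMap (fun p => PySem.Int.toChars p.1)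

-- _split_alternating(chunk)
def splitAltB (chunk : List (Int × String)) : List (Int × String) × List (Int × String) :=
  (PySem.List.enumerate chunk 0).foldl
    (fun bw ix =>
      if PySem.Int.mod ix.1 2 = 0 then (bw.1 ++ [ix.2], bw.2) else (bw.1, bw.2 ++ [ix.2]))
    ([], [])

-- the while-loop of B: consume `middle` ten elements at a time
def loopB (m : List (Int × String)) (parts : List Char) : List Char :=
  if h : 2 ≤ m.length then
    let chunk := PySem.List.slice m none (some 10)
    let rest := PySem.List.slice m (some 10) none
    let bw := splitAltB chunk
    loopB rest (parts ++ digitsB bw.1 ++ digitsB bw.2)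
  else parts
termination_by m.length
decreasing_by
  rw [PySem.List.slice_from m (by norm_num : (0 : Int) ≤ 10)]
  simp only [List.length_drop]
  omega

def deinterleave_alt (encoded : List (Int × String)) : Option String :=
  if digitsB (PySem.List.slice encoded none (some 4)) = ['0', '0', '0', '0'] then
    if digitsB (PySem.List.slice encoded (some (-3)) none) = ['1', '0', '0'] then
      some (String.ofList (loopB (PySem.List.slice encoded (some 4) (some (-3))) []))
    else none
  else none

-- ===== PRECONDITION & SPEC =====
def Spec_deinterleave (encoded : List (Int × String)) (out : Option String) : Prop := out = deinterleave_alt encoded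
instance (encoded : List (Int × String)) (out : Option String) : Decidable (Spec_deinterleave encoded out) := by unfold Spec_deinterleave; infer_instance

-- ===== CLAIM (what is proved, stated in full; the proofs are below) =====
def Claim_equal_deinterleave : Prop := ∀ (encoded : List (Int × String)), Dom_deinterleave encoded → Spec_deinterleave encoded (deinterleave encoded)

-- ===== LEMMAS AND PROOFS =====

-- elements at even / odd positions
def pvEvens {α : Type} : List α → List α
  | [] => []
  | [x] => [x]
  | x :: _ :: t => x :: pvEvens t

def pvOdds {α : Type} : List α → List α
  | [] => []
  | [_] => []
  | _ :: y :: t => y :: pvOdds t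

-- structural version of group(·, 5)
def pvChunks5 {α : Type} (l : List α) : List (List α) :=
  if h : l = [] then [] else l.take 5 :: pvChunks5 (l.drop 5)
termination_by l.length
decreasing_by
  cases l with
  | nil => exact absurd rfl h
  | cons a t => simp

theorem pvEvens_take {α : Type} : ∀ (l : List α) (k : Nat),
    pvEvens (l.take (2 * k)) = (pvEvens l).take k := by
  intro l
  induction l using pvEvens.induct with
  | case1 => intro k; simp [pvEvens]
  | case2 x =>
    intro k
    cases k with
    | zero => simp [pvEvens]
    | succ k => simp [pvEvens, Nat.mul_succ]
  | case3 x y t ih =>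
    intro k
    cases k with
    | zero => simp [pvEvens]
    | succ k => simp only [Nat.mul_succ, List.take_succ_cons, pvEvens, ih k]

theorem pvEvens_drop {α : Type} : ∀ (l : List α) (k : Nat),
    pvEvens (l.drop (2 * k)) = (pvEvens l).drop k := by
  intro l
  induction l using pvEvens.induct with
  | case1 => intro k; simp [pvEvens]
  | case2 x =>
    intro k
    cases k with
    | zero => simp [pvEvens]
    | succ k => simp [pvEvens, Nat.mul_succ]
  | case3 x y t ih =>
    intro k
    cases k with
    | zero => simp [pvEvens]
    | succ k => simp only [Nat.mul_succ, List.drop_succ_cons, pvEvens, ih k]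

theorem pvOdds_take {α : Type} : ∀ (l : List α) (k : Nat),
    pvOdds (l.take (2 * k)) = (pvOdds l).take k := by
  intro l
  induction l using pvOdds.induct with
  | case1 => intro k; simp [pvOdds]
  | case2 x =>
    intro k
    cases k with
    | zero => simp [pvOdds]
    | succ k => simp [pvOdds, Nat.mul_succ]
  | case3 x y t ih =>
    intro k
    cases k with
    | zero => simp [pvOdds]
    | succ k => simp only [Nat.mul_succ, List.take_succ_cons, pvOdds, ih k]

theorem pvOdds_drop {α : Type} : ∀ (l : List α) (k : Nat),
    pvOdds (l.drop (2 * k)) = (pvOdds l).drop k := by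
  intro l
  induction l using pvOdds.induct with
  | case1 => intro k; simp [pvOdds]
  | case2 x =>
    intro k
    cases k with
    | zero => simp [pvOdds]
    | succ k => simp [pvOdds, Nat.mul_succ]
  | case3 x y t ih =>
    intro k
    cases k with
    | zero => simp [pvOdds]
    | succ k => simp only [Nat.mul_succ, List.drop_succ_cons, pvOdds, ih k]

theorem pvOdds_nil_of_short {α : Type} (l : List α) (h : l.length ≤ 1) : pvOdds l = [] := by
  match l, h with
  | [], _ => rfl
  | [x], _ => rfl

theorem pvOdds_ne_nil {α : Type} (l : List α) (h : 2 ≤ l.length) : pvOdds l ≠ [] := by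
  match l, h with
  | x :: y :: t, _ => simp [pvOdds]

theorem pvEvens_ne_nil {α : Type} (l : List α) (h : 1 ≤ l.length) : pvEvens l ≠ [] := by
  match l, h with
  | [x], _ => simp [pvEvens]
  | x :: y :: t, _ => simp [pvEvens]

theorem pvFilterMapEvens {α : Type} : ∀ (l : List α) (c : Nat), (l.length + 1) / 2 ≤ c →
    List.filterMap (fun k => l[2 * k]?) (List.range c) = pvEvens l := by
  intro l
  induction l using pvEvens.induct with
  | case1 => intro c _; simp [pvEvens]
  | case2 x =>
    intro c hc
    simp only [List.length_cons, List.length_nil] at hc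
    obtain ⟨c', rfl⟩ : ∃ c', c = c' + 1 := ⟨c - 1, by omega⟩
    rw [List.range_succ_eq_map]
    simp only [List.filterMap_cons, List.filterMap_map]
    simp [pvEvens, Function.comp, Nat.mul_succ]
  | case3 x y t ih =>
    intro c hc
    simp only [List.length_cons] at hc
    obtain ⟨c', rfl⟩ : ∃ c', c = c' + 1 := ⟨c - 1, by omega⟩
    rw [List.range_succ_eq_map]
    simp only [List.filterMap_cons, List.filterMap_map]
    have he : (fun k => (x :: y :: t)[2 * k]?) ∘ Nat.succ = fun k => t[2 * k]? := by
      funext k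
      simp [Function.comp, Nat.mul_succ]
    rw [he, ih c' (by omega)]
    simp [pvEvens]

theorem pvSliceStepNat {α : Type} (xs : List α) (a b c : Nat) (hc : c = (b - a + 1) / 2) :
    List.filterMap (fun k => xs[a + 2 * k]?) (List.range c) = pvEvens ((xs.drop a).take (b - a)) := by
  have hcongr : ∀ k ∈ List.range c, xs[a + 2 * k]? = ((xs.drop a).take (b - a))[2 * k]? := by
    intro k hk
    rw [List.mem_range] at hk
    have h2k : 2 * k < b - a := by omega
    rw [List.getElem?_take_of_lt h2k, List.getElem?_drop]
  rw [List.filterMap_congr hcongr]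
  apply pvFilterMapEvens
  have : ((xs.drop a).take (b - a)).length ≤ b - a := by
    simp
  omega

theorem pvBlack {α : Type} (xs : List α) :
    (PySem.List.slice? xs (some 4) (some (-3)) 2).getD [] =
      pvEvens (PySem.List.slice xs (some 4) (some (-3))) := by
  simp only [PySem.List.slice?, PySem.List.sliceIndices, PySem.List.slice, PySem.List.clampIdx]
  norm_num
  have e1 : (fun x : Nat => xs[(min 4 ((xs.length : Int)) + 2 * (x : Int)).toNat]?) =
      (fun k : Nat => xs[(min 4 xs.length) + 2 * k]?) := by
    funext k; congr 1; omega
  have e2 : (if 3 + min 4 ((xs.length : Int)) < ((xs.length : Int)) ∨ ((xs.length : Int)) < (0 : Int) then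
        ((max (-3 + ((xs.length : Int))) (0 : Int) - min 4 ((xs.length : Int)) + 2 - 1) / 2).toNat
      else (0 : Nat)) = (xs.length - 3 - min 4 xs.length + 1) / 2 := by
    split_ifs with h
    · omega
    · omega
  have e3 : (if xs.length < 3 then (0 : Nat) else (((xs.length : Int)) + -3).toNat) = xs.length - 3 := by
    split_ifs with h <;> omega
  have e4 : min (Int.toNat 4) xs.length = min 4 xs.length := by simp
  rw [e1, e2, e3, e4]
  exact pvSliceStepNat xs _ _ _ rfl

theorem pvEvensOdds_cons {α : Type} : ∀ (t : List α) (x : α),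
    pvEvens (x :: t) = x :: pvOdds t ∧ pvOdds (x :: t) = pvEvens t := by
  intro t
  induction t with
  | nil => intro x; simp [pvEvens, pvOdds]
  | cons y t ih =>
    intro x
    constructor
    · show pvEvens (x :: y :: t) = _
      rw [pvEvens, (ih y).2]
    · rw [pvOdds, (ih y).1]

theorem pvOdds_eq_evens_tail {α : Type} (l : List α) : pvOdds l = pvEvens l.tail := by
  cases l with
  | nil => rfl
  | cons x t => exact (pvEvensOdds_cons t x).2

theorem pvWhite {α : Type} (xs : List α) :
    (PySem.List.slice? xs (some 5) (some (-3)) 2).getD [] =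
      pvOdds (PySem.List.slice xs (some 4) (some (-3))) := by
  have h5 : (PySem.List.slice? xs (some 5) (some (-3)) 2).getD [] =
      pvEvens ((xs.drop (min 5 xs.length)).take ((xs.length - 3) - min 5 xs.length)) := by
    simp only [PySem.List.slice?, PySem.List.sliceIndices]
    norm_num
    have e1 : (fun x : Nat => xs[(min 5 ((xs.length : Int)) + 2 * (x : Int)).toNat]?) =
        (fun k : Nat => xs[(min 5 xs.length) + 2 * k]?) := by
      funext k; congr 1; omega
    have e2 : (if 3 + min 5 ((xs.length : Int)) < ((xs.length : Int)) ∨ ((xs.length : Int)) < (0 : Int) then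
          ((max (-3 + ((xs.length : Int))) (0 : Int) - min 5 ((xs.length : Int)) + 2 - 1) / 2).toNat
        else (0 : Nat)) = (xs.length - 3 - min 5 xs.length + 1) / 2 := by
      split_ifs with h
      · omega
      · omega
    rw [e1, e2]
    exact pvSliceStepNat xs _ _ _ rfl
  have hmid : PySem.List.slice xs (some 4) (some (-3)) =
      (xs.drop (min 4 xs.length)).take ((xs.length - 3) - min 4 xs.length) := by
    simp only [PySem.List.slice, PySem.List.clampIdx]
    norm_num
    have e3 : (if xs.length < 3 then (0 : Nat) else (((xs.length : Int)) + -3).toNat) = xs.length - 3 := by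
      split_ifs with h <;> omega
    have e4 : min (Int.toNat 4) xs.length = min 4 xs.length := by simp
    rw [e3, e4]
  rw [h5, hmid, pvOdds_eq_evens_tail]
  rw [← List.drop_one, List.drop_take, List.drop_drop]
  rcases Nat.lt_or_ge xs.length 5 with h | h
  · have t1 : xs.length - 3 - min 5 xs.length = 0 := by omega
    have t2 : xs.length - 3 - min 4 xs.length - 1 = 0 := by omega
    rw [t1, t2]
    simp [pvEvens]
  · have hm : min 5 xs.length = min 4 xs.length + 1 := by omega
    rw [hm]
    have t3 : xs.length - 3 - (min 4 xs.length + 1) = xs.length - 3 - min 4 xs.length - 1 := by omega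
    rw [t3]

theorem pvNatChunks {α : Type} : ∀ (c : Nat) (l : List α), c = (l.length + 4) / 5 →
    (List.range c).map (fun k => (l.drop (5 * k)).take 5) = pvChunks5 l := by
  intro c
  induction c with
  | zero =>
    intro l hc
    have : l = [] := by
      cases l with
      | nil => rfl
      | cons x t => simp at hc; omega
    subst this
    rw [pvChunks5]
    simp
  | succ c ih =>
    intro l hc
    have hne : l ≠ [] := by
      intro h; subst h; simp at hc
    rw [List.range_succ_eq_map]
    simp only [List.map_cons, List.map_map]
    have he : ((fun k => (l.drop (5 * k)).take 5) ∘ Nat.succ) = (fun k => ((l.drop 5).drop (5 * k)).take 5) := by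
      funext k
      simp only [Function.comp, List.drop_drop]
      congr 2
      omega
    rw [he, ih (l.drop 5) (by
      have : 0 < l.length := List.length_pos_of_ne_nil hne
      simp only [List.length_drop]
      omega)]
    conv_rhs => rw [pvChunks5]
    simp [hne]
theorem pvGroupA_eq (l : List (Int × String)) : groupA l 5 = pvChunks5 l := by
  unfold groupA
  rw [PySem.List.pyRange_of_pos 0 (l.length : Int) (by norm_num), List.map_map]
  have he : ((fun i => PySem.List.slice l (some i) (some (i + 5))) ∘ (fun k : Nat => (0 : Int) + 5 * ↑k)) =
      (fun k : Nat => (l.drop (5 * k)).take 5) := by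
    funext k
    simp only [Function.comp]
    rw [PySem.List.slice_toNat l (by positivity) (by positivity)]
    have h1 : ((0 : Int) + 5 * (k : Int)).toNat = 5 * k := by omega
    have h2 : ((0 : Int) + 5 * (k : Int) + 5).toNat = 5 * k + 5 := by omega
    rw [h1, h2]
    have h3 : 5 * k + 5 - 5 * k = 5 := by omega
    rw [h3]
  rw [he]
  rcases Nat.eq_zero_or_pos l.length with h0 | hpos
  · have hl : l = [] := List.eq_nil_of_length_eq_zero h0
    subst hl
    rw [pvChunks5]
    simp
  · have hcnt : (if (0 : Int) < ↑l.length then (((l.length : Int) - 0 + 5 - 1) / 5).toNat else 0) = (l.length + 4) / 5 := by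
      split_ifs with h
      · omega
      · omega
    rw [hcnt]
    exact pvNatChunks _ l rfl
theorem pvSplitAux : ∀ (l : List (Int × String)) (s : Int) (b w : List (Int × String)),
    (PySem.List.enumerate l s).foldl
      (fun bw ix =>
        if PySem.Int.mod ix.1 2 = 0 then (bw.1 ++ [ix.2], bw.2) else (bw.1, bw.2 ++ [ix.2]))
      (b, w) =
    if PySem.Int.mod s 2 = 0 then (b ++ pvEvens l, w ++ pvOdds l)
    else (b ++ pvOdds l, w ++ pvEvens l) := by
  intro l
  induction l with
  | nil =>
    intro s b w
    simp [PySem.List.enumerate_nil, pvEvens, pvOdds]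
  | cons x t ih =>
    intro s b w
    rw [PySem.List.enumerate_cons, List.foldl_cons]
    have hmod : PySem.Int.mod s 2 = s % 2 := PySem.Int.mod_eq_emod_of_pos (by norm_num)
    have hmod1 : PySem.Int.mod (s + 1) 2 = (s + 1) % 2 := PySem.Int.mod_eq_emod_of_pos (by norm_num)
    by_cases hs : PySem.Int.mod s 2 = 0
    · have hs1 : ¬ PySem.Int.mod (s + 1) 2 = 0 := by rw [hmod1]; rw [hmod] at hs; omega
      simp only [hs, if_pos, if_true]
      rw [ih (s + 1)]
      simp only [hs1, if_neg, if_false]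
      rw [(pvEvensOdds_cons t x).1, (pvEvensOdds_cons t x).2]
      simp
    · have hs1 : PySem.Int.mod (s + 1) 2 = 0 := by rw [hmod1]; rw [hmod] at hs; omega
      simp only [hs, if_neg, if_false]
      rw [ih (s + 1)]
      simp only [hs1, if_pos, if_true]
      rw [(pvEvensOdds_cons t x).1, (pvEvensOdds_cons t x).2]
      simp
theorem pvChunks5_nil {α : Type} : pvChunks5 ([] : List α) = [] := by
  rw [pvChunks5]
  simp

theorem pvChunks5_cons {α : Type} (l : List α) (h : l ≠ []) :
    pvChunks5 l = l.take 5 :: pvChunks5 (l.drop 5) := by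
  rw [pvChunks5]
  simp [h]

theorem pvSplitAltB_eq (chunk : List (Int × String)) :
    splitAltB chunk = (pvEvens chunk, pvOdds chunk) := by
  unfold splitAltB
  rw [pvSplitAux chunk 0 [] []]
  have h0 : PySem.Int.mod 0 2 = 0 := by decide
  simp [h0]

theorem pvMain : ∀ (n : Nat) (m : List (Int × String)), m.length ≤ n → ∀ (acc : List Char),
    ((pvChunks5 (pvEvens m)).zip (pvChunks5 (pvOdds m))).foldl
      (fun acc bw => acc ++ convertA bw.1 ++ convertA bw.2) acc = loopB m acc := by
  intro n
  induction n with
  | zero =>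
    intro m hm acc
    have hnil : m = [] := by
      cases m with
      | nil => rfl
      | cons a t => simp at hm
    subst hnil
    rw [loopB]
    simp [pvChunks5_nil, pvEvens, pvOdds]
  | succ n ih =>
    intro m hm acc
    by_cases h2 : 2 ≤ m.length
    · rw [loopB, dif_pos h2]
      simp only [PySem.List.slice_to m (by norm_num : (0 : Int) ≤ 10),
        PySem.List.slice_from m (by norm_num : (0 : Int) ≤ 10),
        pvSplitAltB_eq]
      have hev : pvEvens m ≠ [] := pvEvens_ne_nil m (by omega)
      have hod : pvOdds m ≠ [] := pvOdds_ne_nil m h2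
      rw [pvChunks5_cons _ hev, pvChunks5_cons _ hod, List.zip_cons_cons, List.foldl_cons]
      have hA : (pvEvens m).take 5 = pvEvens (m.take 10) := by
        have h := pvEvens_take m 5
        norm_num at h
        exact h.symm
      have hB : (pvOdds m).take 5 = pvOdds (m.take 10) := by
        have h := pvOdds_take m 5
        norm_num at h
        exact h.symm
      have hC : (pvEvens m).drop 5 = pvEvens (m.drop 10) := by
        have h := pvEvens_drop m 5
        norm_num at h
        exact h.symm
      have hD : (pvOdds m).drop 5 = pvOdds (m.drop 10) := by
        have h := pvOdds_drop m 5
        norm_num at h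
        exact h.symm
      rw [hA, hB, hC, hD]
      rw [ih (m.drop 10) (by simp only [List.length_drop]; omega)]
      rfl
    · rw [loopB, dif_neg h2]
      have hodd : pvOdds m = [] := pvOdds_nil_of_short m (by omega)
      rw [hodd, pvChunks5_nil]
      simp

-- ===== VERDICT (by name: the statement is the Claim_ definition above) =====
theorem deinterleave_spec : Claim_equal_deinterleave := by
  intro encoded _
  unfold Spec_deinterleave deinterleave deinterleave_alt
  have hBA : digitsB = convertA := rfl
  rw [hBA]
  by_cases h1 : convertA (PySem.List.slice encoded none (some 4)) = ['0', '0', '0', '0']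
  · by_cases hc2 : convertA (PySem.List.slice encoded (some (-3)) none) = ['1', '0', '0']
    · simp only [h1, hc2, if_pos]
      rw [if_neg (by simp [hc2])]
      simp only [pvBlack encoded, pvWhite encoded, pvGroupA_eq]
      rw [pvMain (PySem.List.slice encoded (some 4) (some (-3))).length _ le_rfl []]
    · rw [if_pos (by simp [hc2]), if_neg hc2, if_pos h1]
  · rw [if_pos (by simp [h1]), if_neg h1]
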